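-- pv_equiv track=rewrite | github.com/busraakara/Connected-Component-Labeling | CCL/connected_component_labeling.py | group_equals
-- ===== SOURCE A (Python) =====
-- def group_equals(lst):
--     groups = []
--     for pair in lst:
--         pair = set(pair)
--         equals_found = 0
--         for idx, group in enumerate(groups):
--             if group.intersection(pair):
--                 equals_found += 1
--                 if equals_found == 1:
--                     # We found a first group that contains one of our values,
--                     # we can add our pair to the group
--                     group.update(pair)
--                     first_group = group
--                 elif equals_found == 2:
--                     # We found a second group that contains the other one of
--                     # our values, we merge it with the first one
--                     first_group.update(group)
--                     del groups[idx]
--                     break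
--         # If none of our values was found, we create a new group
--         if not equals_found:
--             groups.append(pair)
--
--     return [list(sorted(group)) for group in groups]
-- ===== SOURCE B (Python) =====
-- def group_equals(lst):
--     groups = {}   # id -> set, in creation order (merged survivor keeps its slot)
--     where = {}    # element -> set of ids of the groups containing it
--     nid = 0
--     for pair in lst:
--         s = set(pair)
--         hits = set()
--         for e in s:
--             hits |= where.get(e, set())
--         if not hits:
--             groups[nid] = s
--             for e in s:
--                 where.setdefault(e, set()).add(nid)
--             nid += 1
--             continue
--         h = sorted(hits)
--         i = h[0]
--         groups[i] |= s
--         for e in s: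
--             where.setdefault(e, set()).add(i)
--         if len(h) > 1:
--             j = h[1]
--             for e in groups[j]:
--                 w = where[e]
--                 w.discard(j)
--                 w.add(i)
--             groups[i] |= groups[j]
--             del groups[j]
--     return [sorted(g) for g in groups.values()]
-- ===== Notes on version B (the rewrite author's own statement) =====
-- stated objective: alternative
-- what changed: Replaces A's per-pair linear scan over the list of groups with an element-to-group-ids index (dict of sets) plus an id-keyed group dict, so the groups intersecting a pair are found by direct lookup of the pair's elements instead of intersecting the pair with every group.
import Mathlib
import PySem

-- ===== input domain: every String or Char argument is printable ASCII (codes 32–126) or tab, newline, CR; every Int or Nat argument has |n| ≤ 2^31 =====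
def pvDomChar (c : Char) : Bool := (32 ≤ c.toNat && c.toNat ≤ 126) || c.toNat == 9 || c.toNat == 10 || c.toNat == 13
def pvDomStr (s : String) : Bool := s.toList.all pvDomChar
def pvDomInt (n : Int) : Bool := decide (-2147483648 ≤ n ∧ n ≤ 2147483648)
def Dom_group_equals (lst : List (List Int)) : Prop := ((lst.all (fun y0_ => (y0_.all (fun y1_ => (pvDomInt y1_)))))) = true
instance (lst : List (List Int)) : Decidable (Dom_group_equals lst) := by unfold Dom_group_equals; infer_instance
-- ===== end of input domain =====

-- B replaces A's per-pair scan over all groups with an element→group-ids index; equal return value on every input.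

-- ===== PORT A =====
-- A's inner 'for idx, group in enumerate(groups)' after the first hit: keep scanning
-- the remaining groups for a second intersecting one; on a hit it is removed ('del
-- groups[idx]') and returned so the first group can absorb it ('first_group.update'), break.
def pvScan2 (rest : List (List Int)) (s : List Int) : Option (List Int) × List (List Int) :=
  match rest with
  | [] => (none, [])
  | g :: r =>
    if PySem.Set.inter g s ≠ [] then (some g, r)
    else
      let p := pvScan2 r s
      (p.1, g :: p.2)

-- A's inner loop up to the first intersecting group ('equals_found == 1': the group
-- absorbs the pair in place and scanning continues via pvScan2); no hit at all appends.
def pvScan1 (groups : List (List Int)) (s : List Int) : List (List Int) :=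
  match groups with
  | [] => [s]
  | g :: r =>
    if PySem.Set.inter g s ≠ [] then
      match pvScan2 r s with
      | (none, r') => PySem.Set.update g s :: r'
      | (some gj, r') => PySem.Set.update (PySem.Set.update g s) gj :: r'
    else g :: pvScan1 r s

def group_equals (lst : List (List Int)) : List (List Int) :=
  (lst.foldl (fun groups pair => pvScan1 groups (PySem.Set.ofList pair)) []).map
    (fun g => PySem.List.sorted g (fun x => x) false)

-- ===== PORT B =====
-- state: (groups : id → set, where : element → set of ids, next id)
def pvStep (st : PySem.Dict Int (List Int) × PySem.Dict Int (List Int) × Int)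
    (pair : List Int) : PySem.Dict Int (List Int) × PySem.Dict Int (List Int) × Int :=
  let g := st.1
  let w := st.2.1
  let n := st.2.2
  let s : PySem.Set Int := PySem.Set.ofList pair
  let hits : PySem.Set Int := s.foldl (fun acc e => PySem.Set.union acc (w.getD e [])) []
  if hits = [] then
    (g.insert n s,
     s.foldl (fun w e => w.insert e (PySem.Set.add (w.getD e []) n)) w,
     n + 1)
  else
    match PySem.List.sorted hits (fun x => x) false with
    | [] => (g, w, n)  -- unreachable: sorted of the nonempty 'hits' is nonempty
    | i :: t =>
      let g1 := g.modify i [] (fun gi => PySem.Set.update gi s)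
      let w1 := s.foldl (fun w e => w.insert e (PySem.Set.add (w.getD e []) i)) w
      match t with
      | [] => (g1, w1, n)
      | j :: _ =>
        let gj := g1.getD j []
        let w2 := gj.foldl
          (fun w e => w.insert e (PySem.Set.add (PySem.Set.discard (w.getD e []) j) i)) w1
        ((g1.modify i [] (fun gi => PySem.Set.update gi gj)).erase j, w2, n)

def group_equals_alt (lst : List (List Int)) : List (List Int) :=
  ((lst.foldl pvStep (PySem.Dict.mk [], PySem.Dict.mk [], 0)).1.values).map
    (fun g => PySem.List.sorted g (fun x => x) false)

-- ===== PRECONDITION & SPEC =====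
def Spec_group_equals (lst : List (List Int)) (out : List (List Int)) : Prop := out = group_equals_alt lst
instance (lst : List (List Int)) (out : List (List Int)) : Decidable (Spec_group_equals lst out) := by unfold Spec_group_equals; infer_instance

-- ===== CLAIM (what is proved, stated in full; the proofs are below) =====
def Claim_equal_group_equals : Prop := ∀ (lst : List (List Int)), Dom_group_equals lst → Spec_group_equals lst (group_equals lst)

-- ===== LEMMAS AND PROOFS =====

-- the coupling invariant between A's list of groups and B's indexed state
def pvInv (gsA : List (List Int)) (g w : PySem.Dict Int (List Int)) (n : Int) : Prop :=
  ∃ ks : List Int,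
    g.items = ks.zip gsA ∧
    ks.length = gsA.length ∧
    ks.Pairwise (· < ·) ∧
    (∀ k ∈ ks, k < n) ∧
    (∀ grp ∈ gsA, grp.Nodup) ∧
    (∀ e : Int, (w.getD e []).Nodup) ∧
    (∀ e k : Int, k ∈ w.getD e [] ↔ ∃ grp, (k, grp) ∈ ks.zip gsA ∧ e ∈ grp)


lemma pv_mem_foldl_union (s : List Int) (w : PySem.Dict Int (List Int)) (acc : List Int) (k : Int) :
    k ∈ s.foldl (fun acc e => PySem.Set.union acc (w.getD e [])) acc ↔
      k ∈ acc ∨ ∃ e ∈ s, k ∈ w.getD e [] := by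
  induction s generalizing acc with
  | nil => simp
  | cons a s ih =>
    simp only [List.foldl_cons, ih, PySem.Set.mem_union, List.mem_cons]
    constructor
    · rintro (⟨h | h⟩ | ⟨e, he, hk⟩)
      · exact Or.inl h
      · exact Or.inr ⟨a, Or.inl rfl, h⟩
      · exact Or.inr ⟨e, Or.inr he, hk⟩
    · rintro (h | ⟨e, (rfl | he), hk⟩)
      · exact Or.inl (Or.inl h)
      · exact Or.inl (Or.inr hk)
      · exact Or.inr ⟨e, he, hk⟩

lemma pv_nodup_foldl_union (s : List Int) (w : PySem.Dict Int (List Int)) (acc : List Int)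
    (hacc : acc.Nodup) :
    (s.foldl (fun acc e => PySem.Set.union acc (w.getD e [])) acc).Nodup := by
  induction s generalizing acc with
  | nil => exact hacc
  | cons a s ih =>
    simp only [List.foldl_cons]
    exact ih _ (PySem.Set.nodup_union _ _ hacc)

lemma pv_getD_foldl_insert (l : List Int) (f : Int → List Int → List Int)
    (w : PySem.Dict Int (List Int)) (x : Int) (hl : l.Nodup) :
    (l.foldl (fun w e => w.insert e (f e (w.getD e []))) w).getD x []
      = if x ∈ l then f x (w.getD x []) else w.getD x [] := by
  induction l generalizing w with
  | nil => simp
  | cons a l ih =>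
    simp only [List.foldl_cons, List.mem_cons]
    rw [ih _ (hl.sublist (List.sublist_cons_self a l))]
    by_cases hx : x ∈ l
    · have hxa : x ≠ a := fun h => (List.nodup_cons.mp hl).1 (h ▸ hx)
      rw [if_pos hx, if_pos (Or.inr hx), PySem.Dict.getD_insert, if_neg hxa]
    · by_cases hxa : x = a
      · subst hxa
        rw [if_neg hx, if_pos (Or.inl rfl), PySem.Dict.getD_insert, if_pos rfl]
      · rw [if_neg hx, if_neg (by tauto), PySem.Dict.getD_insert, if_neg hxa]

lemma pv_map_replace (l1 l2 : List (Int × List Int)) (k : Int) (gv v : List Int)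
    (hk1 : ∀ p ∈ l1, p.1 ≠ k) (hk2 : ∀ p ∈ l2, p.1 ≠ k) :
    (l1 ++ (k, gv) :: l2).map (fun p => if p.1 == k then (k, v) else p) = l1 ++ (k, v) :: l2 := by
  have e1 : List.map (fun p => if p.1 = k then (k, v) else p) l1 = l1 := by
    rw [List.map_congr_left (g := id) (fun p hp => by simp [hk1 p hp]), List.map_id]
  have e2 : List.map (fun p => if p.1 = k then (k, v) else p) l2 = l2 := by
    rw [List.map_congr_left (g := id) (fun p hp => by simp [hk2 p hp]), List.map_id]
  simp only [List.map_append, List.map_cons, beq_iff_eq]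
  rw [if_pos trivial, e1, e2]

lemma pv_filter_ne (l1 l2 : List (Int × List Int)) (k : Int) (gv : List Int)
    (hk1 : ∀ p ∈ l1, p.1 ≠ k) (hk2 : ∀ p ∈ l2, p.1 ≠ k) :
    (l1 ++ (k, gv) :: l2).filter (fun p => !(p.1 == k)) = l1 ++ l2 := by
  rw [List.filter_append, List.filter_cons]
  have e1 : l1.filter (fun p => !(p.1 == k)) = l1 :=
    List.filter_eq_self.mpr (fun p hp => by simp [hk1 p hp])
  have e2 : l2.filter (fun p => !(p.1 == k)) = l2 :=
    List.filter_eq_self.mpr (fun p hp => by simp [hk2 p hp])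
  simp [e1, e2]

lemma pvScan2_none (rest : List (List Int)) (s : List Int)
    (h : ∀ g ∈ rest, PySem.Set.inter g s = []) : pvScan2 rest s = (none, rest) := by
  induction rest with
  | nil => rfl
  | cons g r ih =>
    rw [pvScan2, if_neg (by simp [h g (by simp)]), ih (fun g hg => h g (by simp [hg]))]

lemma pvScan2_some (mid : List (List Int)) (g2 : List Int) (post : List (List Int)) (s : List Int)
    (hmid : ∀ g ∈ mid, PySem.Set.inter g s = []) (hg2 : PySem.Set.inter g2 s ≠ []) :
    pvScan2 (mid ++ g2 :: post) s = (some g2, mid ++ post) := by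
  induction mid with
  | nil => rw [List.nil_append, pvScan2, if_pos hg2]; rfl
  | cons g r ih =>
    rw [List.cons_append, pvScan2, if_neg (by simp [hmid g (by simp)]),
      ih (fun g hg => hmid g (by simp [hg]))]
    rfl

lemma pvScan1_none (gs : List (List Int)) (s : List Int)
    (h : ∀ g ∈ gs, PySem.Set.inter g s = []) : pvScan1 gs s = gs ++ [s] := by
  induction gs with
  | nil => rfl
  | cons g r ih =>
    rw [pvScan1, if_neg (by simp [h g (by simp)]), ih (fun g hg => h g (by simp [hg])),
      List.cons_append]

lemma pvScan1_one (pre : List (List Int)) (g1 : List Int) (rest : List (List Int)) (s : List Int)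
    (hpre : ∀ g ∈ pre, PySem.Set.inter g s = []) (hg1 : PySem.Set.inter g1 s ≠ [])
    (hrest : ∀ g ∈ rest, PySem.Set.inter g s = []) :
    pvScan1 (pre ++ g1 :: rest) s = pre ++ PySem.Set.update g1 s :: rest := by
  induction pre with
  | nil =>
    rw [List.nil_append, pvScan1, if_pos hg1, pvScan2_none rest s hrest]
    rfl
  | cons g r ih =>
    rw [List.cons_append, pvScan1, if_neg (by simp [hpre g (by simp)]),
      ih (fun g hg => hpre g (by simp [hg])), List.cons_append]

lemma pvScan1_two (pre : List (List Int)) (g1 : List Int) (mid : List (List Int)) (g2 : List Int)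
    (post : List (List Int)) (s : List Int)
    (hpre : ∀ g ∈ pre, PySem.Set.inter g s = []) (hg1 : PySem.Set.inter g1 s ≠ [])
    (hmid : ∀ g ∈ mid, PySem.Set.inter g s = []) (hg2 : PySem.Set.inter g2 s ≠ []) :
    pvScan1 (pre ++ g1 :: (mid ++ g2 :: post)) s
      = pre ++ PySem.Set.update (PySem.Set.update g1 s) g2 :: (mid ++ post) := by
  induction pre with
  | nil =>
    rw [List.nil_append, pvScan1, if_pos hg1, pvScan2_some mid g2 post s hmid hg2]
    rfl
  | cons g r ih =>
    rw [List.cons_append, pvScan1, if_neg (by simp [hpre g (by simp)]),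
      ih (fun g hg => hpre g (by simp [hg])), List.cons_append]

lemma pv_zip_fst_snd {α β : Type} (l : List (α × β)) : (l.map Prod.fst).zip (l.map Prod.snd) = l := by
  induction l with
  | nil => rfl
  | cons p l ih => simp [ih]

lemma pv_getD_fold_add (l : List Int) (i : Int) (w : PySem.Dict Int (List Int)) (x : Int)
    (hl : l.Nodup) :
    (l.foldl (fun w e => w.insert e (PySem.Set.add (w.getD e []) i)) w).getD x []
      = if x ∈ l then PySem.Set.add (w.getD x []) i else w.getD x [] :=
  pv_getD_foldl_insert l (fun _ v => PySem.Set.add v i) w x hl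

lemma pv_getD_fold_discard_add (l : List Int) (j i : Int) (w : PySem.Dict Int (List Int)) (x : Int)
    (hl : l.Nodup) :
    (l.foldl (fun w e => w.insert e (PySem.Set.add (PySem.Set.discard (w.getD e []) j) i)) w).getD x []
      = if x ∈ l then PySem.Set.add (PySem.Set.discard (w.getD x []) j) i else w.getD x [] :=
  pv_getD_foldl_insert l (fun _ v => PySem.Set.add (PySem.Set.discard v j) i) w x hl

lemma pv_nodup_parts2 {l1 l2 : List Int} {a : Int} (h : (l1 ++ a :: l2).Nodup) :
    a ∉ l1 ∧ a ∉ l2 := by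
  simp only [List.nodup_append, List.nodup_cons] at h
  tauto

lemma pv_nodup_parts3 {l1 l2 l3 : List Int} {a b : Int}
    (h : (l1 ++ a :: (l2 ++ b :: l3)).Nodup) :
    a ≠ b ∧ a ∉ l1 ∧ a ∉ l2 ∧ a ∉ l3 ∧ b ∉ l1 ∧ b ∉ l2 ∧ b ∉ l3 := by
  obtain ⟨h1, h2, hdisj⟩ := List.nodup_append.mp h
  obtain ⟨ha, h3⟩ := List.nodup_cons.mp h2
  obtain ⟨hb2, hb3⟩ := pv_nodup_parts2 h3
  refine ⟨fun he => ha (by simp [he]), ?_, ?_, ?_, ?_, hb2, hb3⟩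
  · exact fun hm => hdisj _ hm _ (by simp) rfl
  · exact fun hm => ha (by simp [hm])
  · exact fun hm => ha (by simp [hm])
  · exact fun hm => hdisj _ hm _ (by simp) rfl

lemma pv_zip2 (a b : List (Int × List Int)) (k : Int) (M : List Int) :
    (a.map Prod.fst ++ k :: b.map Prod.fst).zip (a.map Prod.snd ++ M :: b.map Prod.snd)
      = a ++ (k, M) :: b := by
  rw [List.zip_append (by simp), pv_zip_fst_snd]
  simp [pv_zip_fst_snd]

lemma pv_zip3 (a b c : List (Int × List Int)) (k : Int) (M : List Int) :
    (a.map Prod.fst ++ k :: (b.map Prod.fst ++ c.map Prod.fst)).zip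
        (a.map Prod.snd ++ M :: (b.map Prod.snd ++ c.map Prod.snd))
      = a ++ (k, M) :: (b ++ c) := by
  rw [List.zip_append (by simp), pv_zip_fst_snd]
  simp [List.zip_append (l₁ := b.map Prod.fst) (l₂ := b.map Prod.snd) (by simp), pv_zip_fst_snd]

lemma pvStep_inv (gsA : List (List Int)) (g w : PySem.Dict Int (List Int)) (n : Int)
    (pair : List Int) (h : pvInv gsA g w n) :
    pvInv (pvScan1 gsA (PySem.Set.ofList pair)) (pvStep (g, w, n) pair).1
      (pvStep (g, w, n) pair).2.1 (pvStep (g, w, n) pair).2.2 := by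
  obtain ⟨ks, hitems, hlen, hpw, hlt, hgnod, hwnod, hw⟩ := h
  have hknd : ks.Nodup := hpw.imp (fun h => ne_of_lt h)
  have hsnod : (PySem.Set.ofList pair).Nodup := PySem.Set.nodup_ofList pair
  have hmapfst : (ks.zip gsA).map Prod.fst = ks := List.map_fst_zip (le_of_eq hlen)
  have hmapsnd : (ks.zip gsA).map Prod.snd = gsA := List.map_snd_zip (le_of_eq hlen.symm)
  have hkeys : g.keys = ks := by
    show g.items.map _ = ks
    rw [hitems]; exact hmapfst
  have hinter : ∀ grp : List Int,
      PySem.Set.inter grp (PySem.Set.ofList pair) ≠ [] ↔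
        ∃ e ∈ (PySem.Set.ofList pair), e ∈ grp := by
    intro grp
    rw [Ne, List.eq_nil_iff_forall_not_mem]
    push Not
    constructor
    · rintro ⟨x, hx⟩
      rw [PySem.Set.mem_inter _ _ _] at hx
      exact ⟨x, hx.2, hx.1⟩
    · rintro ⟨e, he, hg⟩
      exact ⟨e, (PySem.Set.mem_inter _ _ _).mpr ⟨hg, he⟩⟩
  have hmemhits : ∀ k : Int,
      k ∈ (PySem.Set.ofList pair).foldl (fun acc e => PySem.Set.union acc (w.getD e [])) [] ↔
        ∃ p ∈ ks.zip gsA, p.1 = k ∧ PySem.Set.inter p.2 (PySem.Set.ofList pair) ≠ [] := by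
    intro k
    rw [pv_mem_foldl_union]
    simp only [List.not_mem_nil, false_or]
    constructor
    · rintro ⟨e, he, hk⟩
      obtain ⟨grp, hg, heg⟩ := (hw e k).mp hk
      exact ⟨(k, grp), hg, rfl, (hinter grp).mpr ⟨e, he, heg⟩⟩
    · rintro ⟨⟨k', grp⟩, hg, rfl, hne⟩
      obtain ⟨e, he, heg⟩ := (hinter grp).mp hne
      exact ⟨e, he, (hw e k').mpr ⟨grp, hg, heg⟩⟩
  have hkh_mem : ∀ k : Int,
      k ∈ ((ks.zip gsA).filter
          (fun p => decide (PySem.Set.inter p.2 (PySem.Set.ofList pair) ≠ []))).map Prod.fst ↔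
        ∃ p ∈ ks.zip gsA, p.1 = k ∧ PySem.Set.inter p.2 (PySem.Set.ofList pair) ≠ [] := by
    intro k
    simp only [List.mem_map, List.mem_filter, decide_eq_true_eq]
    constructor
    · rintro ⟨p, ⟨hp, hne⟩, rfl⟩; exact ⟨p, hp, rfl, hne⟩
    · rintro ⟨p, hp, rfl, hne⟩; exact ⟨p, ⟨hp, hne⟩, rfl⟩
  have hkh_sub : (((ks.zip gsA).filter
      (fun p => decide (PySem.Set.inter p.2 (PySem.Set.ofList pair) ≠ []))).map Prod.fst).Sublist ks := by
    have := (List.filter_sublist (l := ks.zip gsA)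
      (p := fun p => decide (PySem.Set.inter p.2 (PySem.Set.ofList pair) ≠ []))).map Prod.fst
    rwa [hmapfst] at this
  have hkh_pw := hpw.sublist hkh_sub
  have hkh_nd : (((ks.zip gsA).filter
      (fun p => decide (PySem.Set.inter p.2 (PySem.Set.ofList pair) ≠ []))).map Prod.fst).Nodup :=
    hkh_pw.imp (fun h => ne_of_lt h)
  have hhits_nd : ((PySem.Set.ofList pair).foldl
      (fun acc e => PySem.Set.union acc (w.getD e [])) []).Nodup :=
    pv_nodup_foldl_union _ _ _ List.nodup_nil
  have hperm : (((ks.zip gsA).filter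
        (fun p => decide (PySem.Set.inter p.2 (PySem.Set.ofList pair) ≠ []))).map Prod.fst).Perm
      ((PySem.Set.ofList pair).foldl (fun acc e => PySem.Set.union acc (w.getD e [])) []) :=
    (List.perm_ext_iff_of_nodup hkh_nd hhits_nd).mpr (fun k => by rw [hkh_mem, hmemhits])
  have hsorted : PySem.List.sorted
      ((PySem.Set.ofList pair).foldl (fun acc e => PySem.Set.union acc (w.getD e [])) [])
      (fun x => x) false
      = ((ks.zip gsA).filter
          (fun p => decide (PySem.Set.inter p.2 (PySem.Set.ofList pair) ≠ []))).map Prod.fst :=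
    PySem.List.sorted_eq_of_perm_of_pairwise_lt _ _ (fun x => x) hperm hkh_pw

  cases hkhc : ((ks.zip gsA).filter (fun p => decide (PySem.Set.inter p.2 (PySem.Set.ofList pair) ≠ []))).map Prod.fst with
  | nil =>
    -- no group intersects the pair: A appends, B creates a fresh id
    have hempty : (PySem.Set.ofList pair).foldl (fun acc e => PySem.Set.union acc (w.getD e [])) [] = [] := by
      have h' := hperm
      rw [hkhc] at h'
      exact h'.symm.eq_nil
    have hstep : pvStep (g, w, n) pair =
        (g.insert n (PySem.Set.ofList pair),
         (PySem.Set.ofList pair).foldl (fun w e => w.insert e (PySem.Set.add (w.getD e []) n)) w,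
         n + 1) := by
      dsimp only [pvStep]
      rw [if_pos hempty]
    rw [hstep]
    dsimp only
    have hmiss : ∀ grp ∈ gsA, PySem.Set.inter grp (PySem.Set.ofList pair) = [] := by
      intro grp hg
      by_contra hne
      rw [← hmapsnd] at hg
      obtain ⟨p, hp, hpe⟩ := List.mem_map.mp hg
      have hmem : p.1 ∈ ((ks.zip gsA).filter (fun p => decide (PySem.Set.inter p.2 (PySem.Set.ofList pair) ≠ []))).map Prod.fst :=
        (hkh_mem p.1).mpr ⟨p, hp, rfl, by rw [hpe]; exact hne⟩
      rw [hkhc] at hmem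
      exact absurd hmem (List.not_mem_nil)
    rw [pvScan1_none _ _ hmiss]
    have hcontn : g.contains n = false := by
      rw [← Bool.not_eq_true, PySem.Dict.contains_iff_mem_keys, hkeys]
      exact fun hn => absurd (hlt n hn) (lt_irrefl n)
    have hzap : (ks ++ [n]).zip (gsA ++ [(PySem.Set.ofList pair)]) = ks.zip gsA ++ [(n, (PySem.Set.ofList pair))] := List.zip_append hlen
    refine ⟨ks ++ [n], ?_, ?_, ?_, ?_, ?_, ?_, ?_⟩
    · rw [PySem.Dict.items_insert_of_not_contains _ _ hcontn, hitems, hzap]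
    · simp [hlen]
    · rw [List.pairwise_append]
      refine ⟨hpw, List.pairwise_singleton _ _, fun a ha b hb => ?_⟩
      simp only [List.mem_singleton] at hb
      subst hb
      exact hlt a ha
    · intro k hk
      rcases List.mem_append.mp hk with h | h
      · exact lt_trans (hlt k h) (by omega)
      · simp only [List.mem_singleton] at h
        omega
    · intro grp hg
      rcases List.mem_append.mp hg with h | h
      · exact hgnod grp h
      · simp only [List.mem_singleton] at h
        subst h
        exact hsnod
    · intro e
      rw [pv_getD_fold_add _ _ _ _ hsnod]
      split_ifs with he
      · exact PySem.Set.nodup_add _ _ (hwnod e)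
      · exact hwnod e
    · intro e k
      rw [pv_getD_fold_add _ _ _ _ hsnod, hzap]
      by_cases he : e ∈ (PySem.Set.ofList pair)
      · rw [if_pos he, PySem.Set.mem_add]
        constructor
        · rintro (hk | rfl)
          · obtain ⟨grp, hg, heg⟩ := (hw e k).mp hk
            exact ⟨grp, List.mem_append_left _ hg, heg⟩
          · exact ⟨(PySem.Set.ofList pair), List.mem_append_right _ (by simp), he⟩
        · rintro ⟨grp, hg, heg⟩
          rcases List.mem_append.mp hg with hg | hg
          · exact Or.inl ((hw e k).mpr ⟨grp, hg, heg⟩)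
          · simp only [List.mem_singleton, Prod.mk.injEq] at hg
            exact Or.inr hg.1
      · rw [if_neg he]
        constructor
        · intro hk
          obtain ⟨grp, hg, heg⟩ := (hw e k).mp hk
          exact ⟨grp, List.mem_append_left _ hg, heg⟩
        · rintro ⟨grp, hg, heg⟩
          rcases List.mem_append.mp hg with hg | hg
          · exact (hw e k).mpr ⟨grp, hg, heg⟩
          · simp only [List.mem_singleton, Prod.mk.injEq] at hg
            exact absurd (hg.2 ▸ heg) he
  | cons k1 t =>
    have hempty : (PySem.Set.ofList pair).foldl (fun acc e => PySem.Set.union acc (w.getD e [])) [] ≠ [] := by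
      intro h0
      have h' := hperm
      rw [hkhc, h0] at h'
      exact absurd h'.eq_nil (by simp)
    obtain ⟨q1, qs, hfil, hq1fst, hqsmap⟩ := List.map_eq_cons_iff.mp hkhc
    obtain ⟨zpre, zrest, hzsdec, hpre_nq, hq1, hfilrest⟩ := List.filter_eq_cons_iff.mp hfil
    obtain ⟨k1', g1⟩ := q1
    have hq1fst' : k1' = k1 := hq1fst
    subst k1'
    have hg1hit : PySem.Set.inter g1 (PySem.Set.ofList pair) ≠ [] := by simpa using hq1
    have hpre_miss : ∀ p ∈ zpre, PySem.Set.inter p.2 (PySem.Set.ofList pair) = [] := by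
      intro p hp
      have := hpre_nq p hp
      simpa [not_not] using this
    have hks_dec : ks = zpre.map Prod.fst ++ k1 :: zrest.map Prod.fst := by
      rw [← hmapfst, hzsdec]
      simp
    have hgs_dec : gsA = zpre.map Prod.snd ++ g1 :: zrest.map Prod.snd := by
      rw [← hmapsnd, hzsdec]
      simp
    have hk1parts : k1 ∉ zpre.map Prod.fst ∧ k1 ∉ zrest.map Prod.fst := by
      have hnd := hknd
      rw [hks_dec] at hnd
      exact pv_nodup_parts2 hnd
    have hprene : ∀ p ∈ zpre, p.1 ≠ k1 := by
      intro p hp he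
      exact hk1parts.1 (he ▸ List.mem_map_of_mem hp)
    have hrestne : ∀ p ∈ zrest, p.1 ≠ k1 := by
      intro p hp he
      exact hk1parts.2 (he ▸ List.mem_map_of_mem hp)
    have hcontk1 : g.contains k1 = true := by
      rw [PySem.Dict.contains_iff_mem_keys, hkeys, hks_dec]
      simp
    have hkeysnd : g.keys.Nodup := by rw [hkeys]; exact hknd
    have hgetk1 : g.getD k1 [] = g1 :=
      PySem.Dict.getD_of_mem_items _ (by rw [hitems, hzsdec]; simp) hkeysnd []
    have hitems1 : (g.modify k1 [] (fun gi => PySem.Set.update gi (PySem.Set.ofList pair))).items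
        = zpre ++ (k1, PySem.Set.update g1 (PySem.Set.ofList pair)) :: zrest := by
      show (g.insert k1 _).items = _
      rw [PySem.Dict.items_insert_of_contains _ _ hcontk1, hgetk1, hitems, hzsdec]
      exact pv_map_replace _ _ _ _ _ hprene hrestne
    have hg1mem : g1 ∈ gsA := by rw [hgs_dec]; simp
    have hg1nod : g1.Nodup := hgnod g1 hg1mem
    have hw1 : ∀ e k : Int,
        k ∈ ((PySem.Set.ofList pair).foldl (fun w e => w.insert e (PySem.Set.add (w.getD e []) k1)) w).getD e [] ↔
          k ∈ w.getD e [] ∨ (e ∈ (PySem.Set.ofList pair) ∧ k = k1) := by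
      intro e k
      rw [pv_getD_fold_add _ _ _ _ hsnod]
      split_ifs with he
      · rw [PySem.Set.mem_add]
        tauto
      · tauto
    have hw1nod : ∀ e : Int,
        (((PySem.Set.ofList pair).foldl (fun w e => w.insert e (PySem.Set.add (w.getD e []) k1)) w).getD e []).Nodup := by
      intro e
      rw [pv_getD_fold_add _ _ _ _ hsnod]
      split_ifs with he
      · exact PySem.Set.nodup_add _ _ (hwnod e)
      · exact hwnod e
    cases t with
    | nil =>
      -- exactly one group intersects the pair
      have hqs : qs = [] := List.map_eq_nil_iff.mp hqsmap
      rw [hqs] at hfilrest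
      have hrest_miss : ∀ p ∈ zrest, PySem.Set.inter p.2 (PySem.Set.ofList pair) = [] := by
        intro p hp
        have := List.filter_eq_nil_iff.mp hfilrest p hp
        simpa [not_not] using this
      have hstep : pvStep (g, w, n) pair =
          (g.modify k1 [] (fun gi => PySem.Set.update gi (PySem.Set.ofList pair)),
           (PySem.Set.ofList pair).foldl (fun w e => w.insert e (PySem.Set.add (w.getD e []) k1)) w,
           n) := by
        dsimp only [pvStep]
        rw [if_neg hempty, hsorted, hkhc]
      rw [hstep]
      dsimp only
      rw [hgs_dec, pvScan1_one _ _ _ _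
        (fun gg hg => by obtain ⟨p, hp, rfl⟩ := List.mem_map.mp hg; exact hpre_miss p hp)
        hg1hit
        (fun gg hg => by obtain ⟨p, hp, rfl⟩ := List.mem_map.mp hg; exact hrest_miss p hp)]
      refine ⟨ks, ?_, ?_, hpw, hlt, ?_, hw1nod, ?_⟩
      · rw [hitems1, hks_dec]
        exact (pv_zip2 zpre zrest k1 (PySem.Set.update g1 (PySem.Set.ofList pair))).symm
      · rw [hks_dec]
        simp
      · intro grp hg
        rcases List.mem_append.mp hg with h | h
        · exact hgnod grp (by rw [hgs_dec]; exact List.mem_append_left _ h)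
        · rcases List.mem_cons.mp h with rfl | h
          · exact PySem.Set.nodup_update _ _ hg1nod
          · exact hgnod grp (by rw [hgs_dec]; exact List.mem_append_right _ (List.mem_cons_of_mem _ h))
      · intro e k
        rw [hw1 e k, hks_dec, pv_zip2 zpre zrest k1 (PySem.Set.update g1 (PySem.Set.ofList pair))]
        constructor
        · rintro (hk | ⟨he, rfl⟩)
          · obtain ⟨grp, hg, heg⟩ := (hw e k).mp hk
            rw [hzsdec] at hg
            rcases List.mem_append.mp hg with hg | hg
            · exact ⟨grp, List.mem_append_left _ hg, heg⟩
            · rcases List.mem_cons.mp hg with hg | hg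
              · injection hg with h1 h2
                subst h1
                subst h2
                refine ⟨PySem.Set.update grp (PySem.Set.ofList pair), by simp, ?_⟩
                rw [PySem.Set.mem_update]
                exact Or.inl heg
              · exact ⟨grp, List.mem_append_right _ (List.mem_cons_of_mem _ hg), heg⟩
          · refine ⟨PySem.Set.update g1 (PySem.Set.ofList pair), by simp, ?_⟩
            rw [PySem.Set.mem_update]
            exact Or.inr he
        · rintro ⟨grp, hg, heg⟩
          rcases List.mem_append.mp hg with hg | hg
          · exact Or.inl ((hw e k).mpr ⟨grp, by rw [hzsdec]; exact List.mem_append_left _ hg, heg⟩)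
          · rcases List.mem_cons.mp hg with hg | hg
            · injection hg with h1 h2
              subst h1
              subst h2
              rw [PySem.Set.mem_update] at heg
              rcases heg with heg | heg
              · exact Or.inl ((hw e k).mpr ⟨g1, by rw [hzsdec]; simp, heg⟩)
              · exact Or.inr ⟨heg, rfl⟩
            · exact Or.inl ((hw e k).mpr
                ⟨grp, by rw [hzsdec]; exact List.mem_append_right _ (List.mem_cons_of_mem _ hg), heg⟩)
    | cons k2 t2 =>
      -- two groups intersect the pair: merge the second into the first, drop its id
      obtain ⟨q2, qs2, hqseq, hq2fst, hqs2map⟩ := List.map_eq_cons_iff.mp hqsmap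
      rw [hqseq] at hfilrest
      obtain ⟨zmid, zpost, hzrdec, hmid_nq, hq2, hfilpost⟩ := List.filter_eq_cons_iff.mp hfilrest
      obtain ⟨k2', g2⟩ := q2
      have hq2fst' : k2' = k2 := hq2fst
      subst k2'
      have hg2hit : PySem.Set.inter g2 (PySem.Set.ofList pair) ≠ [] := by simpa using hq2
      have hmid_miss : ∀ p ∈ zmid, PySem.Set.inter p.2 (PySem.Set.ofList pair) = [] := by
        intro p hp
        have := hmid_nq p hp
        simpa [not_not] using this
      have hzsdec2 : ks.zip gsA = zpre ++ (k1, g1) :: (zmid ++ (k2, g2) :: zpost) := by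
        rw [hzsdec, hzrdec]
      have hks2 : ks = zpre.map Prod.fst ++ k1 :: (zmid.map Prod.fst ++ k2 :: zpost.map Prod.fst) := by
        rw [← hmapfst, hzsdec2]
        simp
      have hgs2 : gsA = zpre.map Prod.snd ++ g1 :: (zmid.map Prod.snd ++ g2 :: zpost.map Prod.snd) := by
        rw [← hmapsnd, hzsdec2]
        simp
      have hnd2 := hknd
      rw [hks2] at hnd2
      obtain ⟨hne12, hk1pre, hk1mid, hk1post, hk2pre, hk2mid, hk2post⟩ := pv_nodup_parts3 hnd2
      have hg2mem : g2 ∈ gsA := by rw [hgs2]; simp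
      have hg2nod : g2.Nodup := hgnod g2 hg2mem
      have hne_k1 : ∀ p ∈ zmid ++ (k2, g2) :: zpost, p.1 ≠ k1 := by
        intro p hp he
        rcases List.mem_append.mp hp with h | h
        · exact hk1mid (he ▸ List.mem_map_of_mem h)
        · rcases List.mem_cons.mp h with rfl | h
          · exact hne12 he.symm
          · exact hk1post (he ▸ List.mem_map_of_mem h)
      have hne_k2l : ∀ p ∈ zpre ++ (k1, (PySem.Set.update (PySem.Set.update g1 (PySem.Set.ofList pair)) g2)) :: zmid, p.1 ≠ k2 := by
        intro p hp he
        rcases List.mem_append.mp hp with h | h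
        · exact hk2pre (he ▸ List.mem_map_of_mem h)
        · rcases List.mem_cons.mp h with rfl | h
          · exact hne12 he
          · exact hk2mid (he ▸ List.mem_map_of_mem h)
      have hne_k2r : ∀ p ∈ zpost, p.1 ≠ k2 := by
        intro p hp he
        exact hk2post (he ▸ List.mem_map_of_mem hp)
      have hitems1' : (g.modify k1 [] (fun gi => PySem.Set.update gi (PySem.Set.ofList pair))).items = zpre ++ (k1, PySem.Set.update g1 (PySem.Set.ofList pair)) :: (zmid ++ (k2, g2) :: zpost) := by
        rw [hitems1, hzrdec]
      have hkeys1 : (g.modify k1 [] (fun gi => PySem.Set.update gi (PySem.Set.ofList pair))).keys = ks := by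
        show (g.modify k1 [] (fun gi => PySem.Set.update gi (PySem.Set.ofList pair))).items.map _ = ks
        rw [hitems1', hks2]
        simp
      have hkeys1nd : (g.modify k1 [] (fun gi => PySem.Set.update gi (PySem.Set.ofList pair))).keys.Nodup := by rw [hkeys1]; exact hknd
      have hget2 : ((g.modify k1 [] (fun gi => PySem.Set.update gi (PySem.Set.ofList pair))).getD k2 []) = g2 :=
        PySem.Dict.getD_of_mem_items _ (by rw [hitems1']; simp) hkeys1nd []
      have hcont1k1 : (g.modify k1 [] (fun gi => PySem.Set.update gi (PySem.Set.ofList pair))).contains k1 = true := by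
        rw [PySem.Dict.contains_iff_mem_keys, hkeys1, hks2]
        simp
      have hget1k1 : (g.modify k1 [] (fun gi => PySem.Set.update gi (PySem.Set.ofList pair))).getD k1 [] = PySem.Set.update g1 (PySem.Set.ofList pair) :=
        PySem.Dict.getD_of_mem_items _ (by rw [hitems1']; simp) hkeys1nd []
      have hitems2 : ((g.modify k1 [] (fun gi => PySem.Set.update gi (PySem.Set.ofList pair))).modify k1 [] (fun gi => PySem.Set.update gi g2)).items
          = zpre ++ (k1, (PySem.Set.update (PySem.Set.update g1 (PySem.Set.ofList pair)) g2)) :: (zmid ++ (k2, g2) :: zpost) := by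
        show ((g.modify k1 [] (fun gi => PySem.Set.update gi (PySem.Set.ofList pair))).insert k1 _).items = _
        rw [PySem.Dict.items_insert_of_contains _ _ hcont1k1, hget1k1, hitems1']
        exact pv_map_replace _ _ _ _ _ hprene hne_k1
      have hitems3 : (((g.modify k1 [] (fun gi => PySem.Set.update gi (PySem.Set.ofList pair))).modify k1 [] (fun gi => PySem.Set.update gi g2)).erase k2).items
          = zpre ++ (k1, (PySem.Set.update (PySem.Set.update g1 (PySem.Set.ofList pair)) g2)) :: (zmid ++ zpost) := by
        show ((g.modify k1 [] (fun gi => PySem.Set.update gi (PySem.Set.ofList pair))).modify k1 [] (fun gi => PySem.Set.update gi g2)).items.filter _ = _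
        rw [hitems2,
          show zpre ++ (k1, (PySem.Set.update (PySem.Set.update g1 (PySem.Set.ofList pair)) g2)) :: (zmid ++ (k2, g2) :: zpost)
              = (zpre ++ (k1, (PySem.Set.update (PySem.Set.update g1 (PySem.Set.ofList pair)) g2)) :: zmid) ++ (k2, g2) :: zpost by simp,
          pv_filter_ne _ _ _ _ hne_k2l hne_k2r]
        simp
      have hstep : pvStep (g, w, n) pair =
          (((g.modify k1 [] (fun gi => PySem.Set.update gi (PySem.Set.ofList pair))).modify k1 [] (fun gi => PySem.Set.update gi ((g.modify k1 [] (fun gi => PySem.Set.update gi (PySem.Set.ofList pair))).getD k2 []))).erase k2,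
           ((g.modify k1 [] (fun gi => PySem.Set.update gi (PySem.Set.ofList pair))).getD k2 []).foldl (fun w e => w.insert e (PySem.Set.add (PySem.Set.discard (w.getD e []) k2) k1)) ((PySem.Set.ofList pair).foldl (fun w e => w.insert e (PySem.Set.add (w.getD e []) k1)) w),
           n) := by
        dsimp only [pvStep]
        rw [if_neg hempty, hsorted, hkhc]
      rw [hstep]
      dsimp only
      rw [hget2]
      rw [hgs2, pvScan1_two _ _ _ _ _ _
        (fun gg hg => by obtain ⟨p, hp, rfl⟩ := List.mem_map.mp hg; exact hpre_miss p hp)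
        hg1hit
        (fun gg hg => by obtain ⟨p, hp, rfl⟩ := List.mem_map.mp hg; exact hmid_miss p hp)
        hg2hit]
      have hsub : (zpre.map Prod.fst ++ k1 :: (zmid.map Prod.fst ++ zpost.map Prod.fst)).Sublist
          (zpre.map Prod.fst ++ k1 :: (zmid.map Prod.fst ++ k2 :: zpost.map Prod.fst)) :=
        ((((List.sublist_cons_self k2 (zpost.map Prod.fst)).append_left
          (zmid.map Prod.fst)).cons₂ k1).append_left (zpre.map Prod.fst))
      refine ⟨zpre.map Prod.fst ++ k1 :: (zmid.map Prod.fst ++ zpost.map Prod.fst),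
        ?_, ?_, ?_, ?_, ?_, ?_, ?_⟩
      · rw [hitems3]
        exact (pv_zip3 zpre zmid zpost k1 (PySem.Set.update (PySem.Set.update g1 (PySem.Set.ofList pair)) g2)).symm
      · simp
      · exact ((hks2 ▸ hpw).sublist hsub)
      · intro k hk
        exact hlt k (by rw [hks2]; exact hsub.subset hk)
      · intro grp hg
        rcases List.mem_append.mp hg with h | h
        · exact hgnod grp (by rw [hgs2]; exact List.mem_append_left _ h)
        · rcases List.mem_cons.mp h with rfl | h
          · exact PySem.Set.nodup_update _ _ (PySem.Set.nodup_update _ _ hg1nod)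
          · rcases List.mem_append.mp h with h | h
            · exact hgnod grp (by
                rw [hgs2]
                exact List.mem_append_right _ (List.mem_cons_of_mem _ (List.mem_append_left _ h)))
            · exact hgnod grp (by
                rw [hgs2]
                exact List.mem_append_right _
                  (List.mem_cons_of_mem _ (List.mem_append_right _ (List.mem_cons_of_mem _ h))))
      · intro e
        rw [pv_getD_fold_discard_add _ _ _ _ _ hg2nod]
        split_ifs with he
        · exact PySem.Set.nodup_add _ _ (PySem.Set.nodup_discard _ _ (hw1nod e))
        · exact hw1nod e
      · intro e k
        rw [pv_getD_fold_discard_add _ _ _ _ _ hg2nod,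
          pv_zip3 zpre zmid zpost k1 (PySem.Set.update (PySem.Set.update g1 (PySem.Set.ofList pair)) g2)]
        by_cases heg2 : e ∈ g2
        · rw [if_pos heg2, PySem.Set.mem_add, PySem.Set.mem_discard]
          constructor
          · rintro (⟨hk, hkne⟩ | hke)
            · rcases (hw1 e k).mp hk with hk | ⟨heS, hke⟩
              · obtain ⟨grp, hgz, heg⟩ := (hw e k).mp hk
                rw [hzsdec2] at hgz
                rcases List.mem_append.mp hgz with hg | hg
                · exact ⟨grp, List.mem_append_left _ hg, heg⟩
                · rcases List.mem_cons.mp hg with hg | hg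
                  · injection hg with h1 h2
                    refine ⟨(PySem.Set.update (PySem.Set.update g1 (PySem.Set.ofList pair)) g2), by rw [h1]; simp, ?_⟩
                    rw [PySem.Set.mem_update, PySem.Set.mem_update]
                    exact Or.inl (Or.inl (h2 ▸ heg))
                  · rcases List.mem_append.mp hg with hg | hg
                    · exact ⟨grp,
                        List.mem_append_right _ (List.mem_cons_of_mem _ (List.mem_append_left _ hg)),
                        heg⟩
                    · rcases List.mem_cons.mp hg with hg | hg
                      · injection hg with h1 h2
                        exact absurd h1 hkne
                      · exact ⟨grp,
                          List.mem_append_right _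
                            (List.mem_cons_of_mem _ (List.mem_append_right _ hg)),
                          heg⟩
              · refine ⟨(PySem.Set.update (PySem.Set.update g1 (PySem.Set.ofList pair)) g2), by rw [hke]; simp, ?_⟩
                rw [PySem.Set.mem_update, PySem.Set.mem_update]
                exact Or.inl (Or.inr heS)
            · refine ⟨(PySem.Set.update (PySem.Set.update g1 (PySem.Set.ofList pair)) g2), by rw [hke]; simp, ?_⟩
              rw [PySem.Set.mem_update]
              exact Or.inr heg2
          · rintro ⟨grp, hgz, heg⟩
            rcases List.mem_append.mp hgz with hg | hg
            · refine Or.inl ⟨(hw1 e k).mpr (Or.inl ((hw e k).mpr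
                ⟨grp, by rw [hzsdec2]; exact List.mem_append_left _ hg, heg⟩)), ?_⟩
              exact fun he => hk2pre (he ▸ List.mem_map_of_mem hg)
            · rcases List.mem_cons.mp hg with hg | hg
              · injection hg with h1 h2
                exact Or.inr h1
              · rcases List.mem_append.mp hg with hg | hg
                · refine Or.inl ⟨(hw1 e k).mpr (Or.inl ((hw e k).mpr
                    ⟨grp, by
                      rw [hzsdec2]
                      exact List.mem_append_right _
                        (List.mem_cons_of_mem _ (List.mem_append_left _ hg)), heg⟩)), ?_⟩
                  exact fun he => hk2mid (he ▸ List.mem_map_of_mem hg)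
                · refine Or.inl ⟨(hw1 e k).mpr (Or.inl ((hw e k).mpr
                    ⟨grp, by
                      rw [hzsdec2]
                      exact List.mem_append_right _
                        (List.mem_cons_of_mem _
                          (List.mem_append_right _ (List.mem_cons_of_mem _ hg))), heg⟩)), ?_⟩
                  exact fun he => hk2post (he ▸ List.mem_map_of_mem hg)
        · rw [if_neg heg2]
          constructor
          · intro hk
            rcases (hw1 e k).mp hk with hk | ⟨heS, hke⟩
            · obtain ⟨grp, hgz, heg⟩ := (hw e k).mp hk
              rw [hzsdec2] at hgz
              rcases List.mem_append.mp hgz with hg | hg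
              · exact ⟨grp, List.mem_append_left _ hg, heg⟩
              · rcases List.mem_cons.mp hg with hg | hg
                · injection hg with h1 h2
                  refine ⟨(PySem.Set.update (PySem.Set.update g1 (PySem.Set.ofList pair)) g2), by rw [h1]; simp, ?_⟩
                  rw [PySem.Set.mem_update, PySem.Set.mem_update]
                  exact Or.inl (Or.inl (h2 ▸ heg))
                · rcases List.mem_append.mp hg with hg | hg
                  · exact ⟨grp,
                      List.mem_append_right _ (List.mem_cons_of_mem _ (List.mem_append_left _ hg)),
                      heg⟩
                  · rcases List.mem_cons.mp hg with hg | hg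
                    · injection hg with h1 h2
                      exact absurd (h2 ▸ heg) heg2
                    · exact ⟨grp,
                        List.mem_append_right _
                          (List.mem_cons_of_mem _ (List.mem_append_right _ hg)),
                        heg⟩
            · refine ⟨(PySem.Set.update (PySem.Set.update g1 (PySem.Set.ofList pair)) g2), by rw [hke]; simp, ?_⟩
              rw [PySem.Set.mem_update, PySem.Set.mem_update]
              exact Or.inl (Or.inr heS)
          · rintro ⟨grp, hgz, heg⟩
            rcases List.mem_append.mp hgz with hg | hg
            · exact (hw1 e k).mpr (Or.inl ((hw e k).mpr
                ⟨grp, by rw [hzsdec2]; exact List.mem_append_left _ hg, heg⟩))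
            · rcases List.mem_cons.mp hg with hg | hg
              · injection hg with h1 h2
                rw [h2, PySem.Set.mem_update] at heg
                rcases heg with heg | heg
                · rw [PySem.Set.mem_update] at heg
                  rcases heg with heg | heS
                  · exact (hw1 e k).mpr (Or.inl ((hw e k).mpr
                      ⟨g1, by rw [hzsdec2, h1]; simp, heg⟩))
                  · exact (hw1 e k).mpr (Or.inr ⟨heS, h1⟩)
                · exact absurd heg heg2
              · rcases List.mem_append.mp hg with hg | hg
                · exact (hw1 e k).mpr (Or.inl ((hw e k).mpr
                    ⟨grp, by
                      rw [hzsdec2]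
                      exact List.mem_append_right _
                        (List.mem_cons_of_mem _ (List.mem_append_left _ hg)), heg⟩))
                · exact (hw1 e k).mpr (Or.inl ((hw e k).mpr
                    ⟨grp, by
                      rw [hzsdec2]
                      exact List.mem_append_right _
                        (List.mem_cons_of_mem _
                          (List.mem_append_right _ (List.mem_cons_of_mem _ hg))), heg⟩))


lemma pvFold_inv (lst : List (List Int)) (gsA : List (List Int))
    (st : PySem.Dict Int (List Int) × PySem.Dict Int (List Int) × Int)
    (h : pvInv gsA st.1 st.2.1 st.2.2) :
    pvInv (lst.foldl (fun groups pair => pvScan1 groups (PySem.Set.ofList pair)) gsA)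
      (lst.foldl pvStep st).1 (lst.foldl pvStep st).2.1 (lst.foldl pvStep st).2.2 := by
  induction lst generalizing gsA st with
  | nil => exact h
  | cons p rest ih =>
    simp only [List.foldl_cons]
    exact ih _ _ (by obtain ⟨g, w, n⟩ := st; exact pvStep_inv _ _ _ _ _ h)

-- ===== VERDICT (by name: the statement is the Claim_ definition above) =====
theorem group_equals_spec : Claim_equal_group_equals := by
  intro lst _
  unfold Spec_group_equals group_equals group_equals_alt
  have h0 : pvInv [] (PySem.Dict.mk []) (PySem.Dict.mk []) 0 := by
    refine ⟨[], by simp, rfl, by simp, by simp, by simp, ?_, ?_⟩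
    · intro e; simp [PySem.Dict.getD, PySem.Dict.get?]
    · intro e k; simp [PySem.Dict.getD, PySem.Dict.get?]
  have h := pvFold_inv lst [] (PySem.Dict.mk [], PySem.Dict.mk [], 0) h0
  obtain ⟨ks, hitems, hlen, -, -, -, -, -⟩ := h
  have : (lst.foldl pvStep (PySem.Dict.mk [], PySem.Dict.mk [], 0)).1.values
      = lst.foldl (fun groups pair => pvScan1 groups (PySem.Set.ofList pair)) [] := by
    simp only [PySem.Dict.values, hitems]
    exact List.map_snd_zip (by omega)
  rw [this]
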